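-- pv_equiv track=rewrite | github.com/Eduardo-bat/mst_project | prim_mst/sw_src/mst_checker/mst_checker.py | is_valid_spanning_tree
-- ===== SOURCE A (Python) =====
-- class UnionFind:
--     def __init__(self, n):
--         self.parent = list(range(n))
--         self.rank = [0] * n
--
--     def find(self, u):
--         if self.parent[u] != u:
--             self.parent[u] = self.find(self.parent[u])
--         return self.parent[u]
--
--     def union(self, u, v):
--         root_u = self.find(u)
--         root_v = self.find(v)
--         if root_u != root_v:
--             if self.rank[root_u] > self.rank[root_v]:
--                 self.parent[root_v] = root_u
--             elif self.rank[root_u] < self.rank[root_v]: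
--                 self.parent[root_u] = root_v
--             else:
--                 self.parent[root_v] = root_u
--                 self.rank[root_u] += 1
--
-- def is_valid_spanning_tree(graph, spanning_tree, n):
--     if len(spanning_tree) != n - 1:
--         return False
--
--     uf = UnionFind(n)
--     for u, v, w in spanning_tree:
--         if uf.find(u) == uf.find(v):
--             return False
--         uf.union(u, v)
--
--     return True
-- ===== SOURCE B (Python) =====
-- def is_valid_spanning_tree(graph, spanning_tree, n):
--     if len(spanning_tree) != n - 1:
--         return False
--     comp = list(range(n))
--     for u, v, w in spanning_tree:
--         cu, cv = comp[u], comp[v]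
--         if cu == cv:
--             return False
--         comp = [cu if c == cv else c for c in comp]
--     return True
-- ===== Notes on version B (the rewrite author's own statement) =====
-- stated objective: simpler
-- what changed: Replaces the UnionFind class (recursive find with path compression, union by rank) by a flat component-label array that is relabeled on each accepted edge, so the whole check is one loop with no recursion and no auxiliary class.
-- outside the precondition, e.g. on is_valid_spanning_tree([], [(0, 0, 1), (5, 0, 1)], 3): A returns False, B returns False
import Mathlib
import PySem

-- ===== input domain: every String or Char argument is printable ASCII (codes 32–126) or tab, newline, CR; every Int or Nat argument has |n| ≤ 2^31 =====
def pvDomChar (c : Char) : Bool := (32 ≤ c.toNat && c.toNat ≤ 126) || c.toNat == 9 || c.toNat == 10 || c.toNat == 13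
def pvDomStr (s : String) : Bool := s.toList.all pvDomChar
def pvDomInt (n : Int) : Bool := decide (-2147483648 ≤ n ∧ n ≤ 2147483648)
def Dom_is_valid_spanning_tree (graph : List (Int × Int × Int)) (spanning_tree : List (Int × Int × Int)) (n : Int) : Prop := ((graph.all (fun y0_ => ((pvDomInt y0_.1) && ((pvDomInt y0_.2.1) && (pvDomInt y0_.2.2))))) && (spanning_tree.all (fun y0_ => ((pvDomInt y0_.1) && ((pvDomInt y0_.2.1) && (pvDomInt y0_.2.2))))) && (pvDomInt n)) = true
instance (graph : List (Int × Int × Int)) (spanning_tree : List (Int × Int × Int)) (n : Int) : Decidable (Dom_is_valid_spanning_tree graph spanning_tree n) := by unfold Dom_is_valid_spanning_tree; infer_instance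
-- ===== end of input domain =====

-- B replaces the union-find class by a flat component-label array relabeled per edge: simpler, no recursion (return value only; neither version mutates its arguments).

-- ===== PORT A =====

-- UnionFind.find with path compression; Python's unbounded recursion is given
-- fuel parent.length + 2 at every call site, enough for every chain the
-- algorithm can build (proved below); out-of-range indices (excluded by Pre_)
-- fall back to the total pyGetD/pySetD defaults.
def pyFind (fuel : Nat) (parent : List Int) (u : Int) : Int × List Int :=
  match fuel with
  | 0 => (u, parent)
  | f + 1 =>
    let p := PySem.List.pyGetD parent u 0
    if p ≠ u then
      let res := pyFind f parent p
      let parent2 := PySem.List.pySetD res.2 u res.1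
      (PySem.List.pyGetD parent2 u 0, parent2)
    else (p, parent)

-- UnionFind.union (returns the new (parent, rank))
def pyUnion (parent rank : List Int) (u v : Int) : List Int × List Int :=
  let fu := pyFind (parent.length + 2) parent u
  let fv := pyFind (fu.2.length + 2) fu.2 v
  if fu.1 ≠ fv.1 then
    let ru := PySem.List.pyGetD rank fu.1 0
    let rv := PySem.List.pyGetD rank fv.1 0
    if ru > rv then (PySem.List.pySetD fv.2 fv.1 fu.1, rank)
    else if ru < rv then (PySem.List.pySetD fv.2 fu.1 fv.1, rank)
    else (PySem.List.pySetD fv.2 fv.1 fu.1, PySem.List.pySetD rank fu.1 (ru + 1))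
  else (fv.2, rank)

-- the 'for u, v, w in spanning_tree' loop of A
def loopA : List (Int × Int × Int) → List Int → List Int → Bool
  | [], _, _ => true
  | (u, v, _w) :: rest, parent, rank =>
    let fu := pyFind (parent.length + 2) parent u
    let fv := pyFind (fu.2.length + 2) fu.2 v
    if fu.1 = fv.1 then false
    else
      let pr := pyUnion fv.2 rank u v
      loopA rest pr.1 pr.2

def is_valid_spanning_tree (graph : List (Int × Int × Int)) (spanning_tree : List (Int × Int × Int)) (n : Int) : Bool :=
  if (spanning_tree.length : Int) ≠ n - 1 then false
  else loopA spanning_tree (PySem.List.pyRange 0 n 1) (List.replicate n.toNat 0)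

-- ===== PORT B =====

-- the 'for u, v, w in spanning_tree' loop of B over the component-label array
def loopB : List (Int × Int × Int) → List Int → Bool
  | [], _ => true
  | (u, v, _w) :: rest, comp =>
    let cu := PySem.List.pyGetD comp u 0
    let cv := PySem.List.pyGetD comp v 0
    if cu = cv then false
    else loopB rest (comp.map (fun c => if c = cv then cu else c))

def is_valid_spanning_tree_alt (graph : List (Int × Int × Int)) (spanning_tree : List (Int × Int × Int)) (n : Int) : Bool :=
  if (spanning_tree.length : Int) ≠ n - 1 then false
  else loopB spanning_tree (PySem.List.pyRange 0 n 1)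

-- ===== PRECONDITION & SPEC =====
-- Pre_ excludes inputs where some edge endpoint is outside [-n, n): there A raises
-- IndexError, except when A already returned False at an earlier edge — expressing
-- A's stopping point in closed form would re-simulate the algorithm, so Pre_ is
-- conservative; on those excluded returning inputs both A and B return False.
def Pre_is_valid_spanning_tree (graph : List (Int × Int × Int)) (spanning_tree : List (Int × Int × Int)) (n : Int) : Prop :=
  (spanning_tree.length : Int) = n - 1 →
  ∀ e ∈ spanning_tree, (-n ≤ e.1 ∧ e.1 < n ∧ -n ≤ e.2.1 ∧ e.2.1 < n)
instance (graph : List (Int × Int × Int)) (spanning_tree : List (Int × Int × Int)) (n : Int) : Decidable (Pre_is_valid_spanning_tree graph spanning_tree n) := by unfold Pre_is_valid_spanning_tree; infer_instance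

def pvWitness_is_valid_spanning_tree : (List (Int × Int × Int)) × (List (Int × Int × Int)) × Int :=
  ([], [(0, 1, 5), (1, 2, 7)], 3)

def Spec_is_valid_spanning_tree (graph : List (Int × Int × Int)) (spanning_tree : List (Int × Int × Int)) (n : Int) (out : Bool) : Prop := out = is_valid_spanning_tree_alt graph spanning_tree n
instance (graph : List (Int × Int × Int)) (spanning_tree : List (Int × Int × Int)) (n : Int) (out : Bool) : Decidable (Spec_is_valid_spanning_tree graph spanning_tree n out) := by unfold Spec_is_valid_spanning_tree; infer_instance

-- ===== CLAIM (what is proved, stated in full; the proofs are below) =====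
def Claim_equal_is_valid_spanning_tree : Prop := ∀ (graph : List (Int × Int × Int)) (spanning_tree : List (Int × Int × Int)) (n : Int), Dom_is_valid_spanning_tree graph spanning_tree n → Pre_is_valid_spanning_tree graph spanning_tree n → Spec_is_valid_spanning_tree graph spanning_tree n (is_valid_spanning_tree graph spanning_tree n)

-- ===== LEMMAS AND PROOFS =====

def gp (xs : List Int) (u : Int) : Int := PySem.List.pyGetD xs u 0

lemma pyIdx_wrap (n : Nat) (u : Int) (h1 : -(n : Int) ≤ u) (h2 : u < 0) :
    PySem.List.pyIdx? n u = PySem.List.pyIdx? n (u + n) := by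
  simp only [PySem.List.pyIdx?]
  split_ifs <;> first | rfl | omega | (congr 1; omega)

lemma gp_nonneg_eq_getD (xs : List Int) (i : Int) (h : 0 ≤ i) :
    gp xs i = xs.getD i.toNat 0 := by
  simp only [gp, PySem.List.pyGetD, PySem.List.pyGet?, PySem.List.pyIdx?, if_pos h]
  split_ifs with h2
  · simp [List.getD_eq_getElem?_getD]
  · rw [List.getD_eq_getElem?_getD, List.getElem?_eq_none (by omega)]; rfl

lemma gp_wrap (xs : List Int) (u : Int) (h1 : -(xs.length : Int) ≤ u) (h2 : u < 0) :
    gp xs u = gp xs (u + xs.length) := by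
  simp only [gp, PySem.List.pyGetD, PySem.List.pyGet?, pyIdx_wrap xs.length u h1 h2]

lemma set_wrap (xs : List Int) (u v : Int) (h1 : -(xs.length : Int) ≤ u) (h2 : u < 0) :
    PySem.List.pySetD xs u v = PySem.List.pySetD xs (u + xs.length) v := by
  simp only [PySem.List.pySetD, PySem.List.pySet?, pyIdx_wrap xs.length u h1 h2]

lemma gp_set (xs : List Int) (i j v : Int) (hi0 : 0 ≤ i) (hi : i < xs.length) (hj : 0 ≤ j) :
    gp (PySem.List.pySetD xs i v) j = if j = i then v else gp xs j := by
  rw [PySem.List.pySetD_of_nonneg xs v hi0]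
  rcases lt_or_ge j xs.length with hjl | hjl
  · rw [gp_nonneg_eq_getD _ _ hj, gp_nonneg_eq_getD _ _ hj]
    rw [List.getD_eq_getElem?_getD, List.getD_eq_getElem?_getD, List.getElem?_set]
    by_cases h : j = i
    · rw [if_pos (by omega : i.toNat = j.toNat), if_pos (by omega : i.toNat < xs.length),
        if_pos h]; rfl
    · rw [if_neg (by omega : ¬ i.toNat = j.toNat), if_neg h]
  · have hj2 : ¬ j < ((xs.set i.toNat v).length : Int) := by simp; omega
    have hj3 : ¬ j < (xs.length : Int) := by omega
    have e1 : gp (xs.set i.toNat v) j = 0 := by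
      simp only [gp, PySem.List.pyGetD, PySem.List.pyGet?, PySem.List.pyIdx?]
      simp only [List.length_set]
      rw [if_pos hj, if_neg (by omega)]
      rfl
    have e2 : gp xs j = 0 := by
      simp only [gp, PySem.List.pyGetD, PySem.List.pyGet?, PySem.List.pyIdx?]
      rw [if_pos hj, if_neg (by omega)]
      rfl
    rw [e1, if_neg (by omega), e2]

lemma len_set (xs : List Int) (i v : Int) : (PySem.List.pySetD xs i v).length = xs.length := by
  simp [PySem.List.length_pySetD]

lemma gp_map (comp : List Int) (f : Int → Int) (j : Int) (hj0 : 0 ≤ j) (hj : j < comp.length) :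
    gp (comp.map f) j = f (gp comp j) := by
  rw [gp_nonneg_eq_getD _ _ hj0, gp_nonneg_eq_getD _ _ hj0]
  rw [List.getD_eq_getElem?_getD, List.getD_eq_getElem?_getD, List.getElem?_map]
  rw [List.getElem?_eq_getElem (by omega : j.toNat < comp.length)]
  simp

def rootF : Nat → List Int → Int → Int
  | 0, _, u => u
  | f + 1, parent, u => if gp parent u = u then u else rootF f parent (gp parent u)

def Stab (f : Nat) (parent : List Int) (u : Int) : Prop :=
  gp parent (rootF f parent u) = rootF f parent u

lemma rootF_fix (f : Nat) (p : List Int) (u : Int) (h : gp p u = u) : rootF f p u = u := by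
  induction f with
  | zero => rfl
  | succ f ih => simp [rootF, h]

lemma stab_mono (f g : Nat) (p : List Int) (u : Int) (hfg : f ≤ g) (h : Stab f p u) :
    rootF g p u = rootF f p u ∧ Stab g p u := by
  induction f generalizing u g with
  | zero =>
    have hu : gp p u = u := h
    constructor
    · rw [rootF_fix g p u hu]; rfl
    · show gp p (rootF g p u) = rootF g p u
      rw [rootF_fix g p u hu]; exact hu
  | succ f ih =>
    obtain ⟨g, rfl⟩ : ∃ g', g = g' + 1 := ⟨g - 1, by omega⟩
    by_cases hu : gp p u = u
    · have e1 : rootF (g + 1) p u = u := rootF_fix _ p u hu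
      have e2 : rootF (f + 1) p u = u := rootF_fix _ p u hu
      refine ⟨by rw [e1, e2], ?_⟩
      show gp p (rootF (g + 1) p u) = rootF (g + 1) p u
      rw [e1]; exact hu
    · have hs : Stab f p (gp p u) := by
        show gp p (rootF f p (gp p u)) = rootF f p (gp p u)
        have : rootF (f + 1) p u = rootF f p (gp p u) := by simp [rootF, hu]
        rw [← this]; exact h
      have := ih g (gp p u) (by omega) hs
      have e1 : rootF (g + 1) p u = rootF g p (gp p u) := by simp [rootF, hu]
      have e2 : rootF (f + 1) p u = rootF f p (gp p u) := by simp [rootF, hu]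
      refine ⟨by rw [e1, e2, this.1], ?_⟩
      show gp p (rootF (g + 1) p u) = rootF (g + 1) p u
      rw [e1]; rw [e1] at *; exact this.2

lemma stab_unique (f g : Nat) (p : List Int) (u : Int) (hf : Stab f p u) (hg : Stab g p u) :
    rootF f p u = rootF g p u := by
  rcases le_total f g with h | h
  · rw [(stab_mono f g p u h hf).1]
  · rw [(stab_mono g f p u h hg).1]

lemma rootF_range (f : Nat) (p : List Int) (N : Nat)
    (hrng : ∀ x : Int, 0 ≤ x → x < N → 0 ≤ gp p x ∧ gp p x < N)
    (u : Int) (h0 : 0 ≤ u) (hN : u < N) : 0 ≤ rootF f p u ∧ rootF f p u < N := by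
  induction f generalizing u with
  | zero => exact ⟨h0, hN⟩
  | succ f ih =>
    by_cases hu : gp p u = u
    · rw [rootF_fix _ p u hu]; exact ⟨h0, hN⟩
    · have : rootF (f + 1) p u = rootF f p (gp p u) := by simp [rootF, hu]
      rw [this]
      exact ih (gp p u) (hrng u h0 hN).1 (hrng u h0 hN).2

lemma gp_comp_rootF (f : Nat) (p comp : List Int) (N : Nat)
    (hrng : ∀ x : Int, 0 ≤ x → x < N → 0 ≤ gp p x ∧ gp p x < N)
    (hlink : ∀ x : Int, 0 ≤ x → x < N → gp comp (gp p x) = gp comp x)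
    (u : Int) (h0 : 0 ≤ u) (hN : u < N) :
    gp comp (rootF f p u) = gp comp u := by
  induction f generalizing u with
  | zero => rfl
  | succ f ih =>
    by_cases hu : gp p u = u
    · rw [rootF_fix _ p u hu]
    · have e : rootF (f + 1) p u = rootF f p (gp p u) := by simp [rootF, hu]
      rw [e, ih (gp p u) (hrng u h0 hN).1 (hrng u h0 hN).2, hlink u h0 hN]

lemma rootF_ext (f : Nat) (p q : List Int) (N : Nat)
    (hpq : ∀ y : Int, 0 ≤ y → gp p y = gp q y)
    (hrng : ∀ x : Int, 0 ≤ x → x < N → 0 ≤ gp p x ∧ gp p x < N)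
    (u : Int) (h0 : 0 ≤ u) (hN : u < N) :
    rootF f p u = rootF f q u ∧ (Stab f p u → Stab f q u) := by
  induction f generalizing u with
  | zero =>
    refine ⟨rfl, fun h => ?_⟩
    show gp q u = u
    rw [← hpq u h0]; exact h
  | succ f ih =>
    have hg : gp p u = gp q u := hpq u h0
    by_cases hu : gp p u = u
    · have e1 : rootF (f + 1) p u = u := rootF_fix _ p u hu
      have e2 : rootF (f + 1) q u = u := rootF_fix _ q u (by rw [← hg]; exact hu)
      refine ⟨by rw [e1, e2], fun _ => ?_⟩
      show gp q (rootF (f + 1) q u) = rootF (f + 1) q u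
      rw [e2, ← hg]; exact hu
    · have e1 : rootF (f + 1) p u = rootF f p (gp p u) := by simp [rootF, hu]
      have e2 : rootF (f + 1) q u = rootF f q (gp q u) := by
        simp [rootF, show gp q u ≠ u by rw [← hg]; exact hu]
      have hrec := ih (gp p u) (hrng u h0 hN).1 (hrng u h0 hN).2
      refine ⟨by rw [e1, e2, ← hg, hrec.1], fun hs => ?_⟩
      have hs' : Stab f p (gp p u) := by
        show gp p (rootF f p (gp p u)) = rootF f p (gp p u)
        rw [← e1]; exact hs
      have := hrec.2 hs'
      show gp q (rootF (f + 1) q u) = rootF (f + 1) q u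
      rw [e2, ← hg]; exact this

lemma compress_spec (P : List Int) (N : Nat) (a r : Int)
    (hlen : P.length = N)
    (hrng : ∀ x : Int, 0 ≤ x → x < N → 0 ≤ gp P x ∧ gp P x < N)
    (ha0 : 0 ≤ a) (haN : a < N) (hnr : gp P a ≠ a)
    (hr : gp P r = r) (hra : ∃ g, Stab g P a ∧ rootF g P a = r) :
    ∀ x : Int, 0 ≤ x → x < N → ∀ g : Nat, Stab g P x →
      Stab g (PySem.List.pySetD P a r) x ∧
      rootF g (PySem.List.pySetD P a r) x = rootF g P x := by
  obtain ⟨g0, hg0, hg0r⟩ := hra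
  have hrna : r ≠ a := fun h => hnr (by rw [← h] at hnr ⊢; exact absurd (h ▸ hr) (h ▸ hnr))
  have hget : ∀ y : Int, 0 ≤ y → gp (PySem.List.pySetD P a r) y = if y = a then r else gp P y :=
    fun y hy => gp_set P a y r ha0 (by omega) hy
  intro x hx0 hxN g
  induction g generalizing x with
  | zero =>
    intro hs
    have hx : gp P x = x := hs
    have hxa : x ≠ a := fun h => hnr (h ▸ hx)
    have e : gp (PySem.List.pySetD P a r) x = x := by rw [hget x hx0, if_neg hxa]; exact hx
    exact ⟨e, rfl⟩
  | succ g ih =>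
    intro hs
    by_cases hx : gp P x = x
    · have hxa : x ≠ a := fun h => hnr (h ▸ hx)
      have e : gp (PySem.List.pySetD P a r) x = x := by rw [hget x hx0, if_neg hxa]; exact hx
      have e1 : rootF (g + 1) (PySem.List.pySetD P a r) x = x := rootF_fix _ _ x e
      have e2 : rootF (g + 1) P x = x := rootF_fix _ _ x hx
      constructor
      · show gp _ (rootF (g + 1) _ x) = _
        rw [e1]; exact e
      · rw [e1, e2]
    · by_cases hxa : x = a
      · subst hxa
        have hr0 : 0 ≤ r ∧ r < N := hg0r ▸ rootF_range g0 P N hrng x hx0 hxN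
        have ep : gp (PySem.List.pySetD P x r) x = r := by rw [hget x hx0, if_pos rfl]
        have epr : gp (PySem.List.pySetD P x r) r = r := by
          rw [hget r hr0.1, if_neg hrna]; exact hr
        have e1 : rootF (g + 1) (PySem.List.pySetD P x r) x = r := by
          have : rootF (g + 1) (PySem.List.pySetD P x r) x
              = rootF g (PySem.List.pySetD P x r) (gp (PySem.List.pySetD P x r) x) := by
            simp [rootF, ep, show r ≠ x from fun h => hrna h]
          rw [this, ep, rootF_fix _ _ r epr]
        have e2 : rootF (g + 1) P x = r := by rw [← hg0r]; exact stab_unique _ _ P x hs hg0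
        constructor
        · show gp _ (rootF (g + 1) _ x) = _
          rw [e1]; exact epr
        · rw [e1, e2]
      · have hy0 : 0 ≤ gp P x ∧ gp P x < N := hrng x hx0 hxN
        have hs' : Stab g P (gp P x) := by
          show gp P (rootF g P (gp P x)) = _
          have : rootF (g + 1) P x = rootF g P (gp P x) := by simp [rootF, hx]
          rw [← this]; exact hs
        have hrec := ih (gp P x) hy0.1 hy0.2 hs'
        have ex : gp (PySem.List.pySetD P a r) x = gp P x := by rw [hget x hx0, if_neg hxa]
        have e1 : rootF (g + 1) (PySem.List.pySetD P a r) x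
            = rootF g (PySem.List.pySetD P a r) (gp P x) := by
          simp [rootF, ex, hx]
        have e2 : rootF (g + 1) P x = rootF g P (gp P x) := by simp [rootF, hx]
        constructor
        · show gp _ (rootF (g + 1) _ x) = _
          rw [e1]; exact hrec.1
        · rw [e1, e2, hrec.2]

lemma link_spec (P : List Int) (N : Nat) (a b : Int)
    (hlen : P.length = N)
    (hrng : ∀ x : Int, 0 ≤ x → x < N → 0 ≤ gp P x ∧ gp P x < N)
    (ha0 : 0 ≤ a) (haN : a < N) (hb0 : 0 ≤ b) (hbN : b < N)
    (hra : gp P a = a) (hrb : gp P b = b) (hab : a ≠ b) :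
    ∀ x : Int, 0 ≤ x → x < N → ∀ g : Nat, Stab g P x →
      Stab (g + 1) (PySem.List.pySetD P b a) x ∧
      rootF (g + 1) (PySem.List.pySetD P b a) x =
        (if rootF g P x = b then a else rootF g P x) := by
  have hget : ∀ y : Int, 0 ≤ y → gp (PySem.List.pySetD P b a) y = if y = b then a else gp P y :=
    fun y hy => gp_set P b y a hb0 (by omega) hy
  have epa : gp (PySem.List.pySetD P b a) a = a := by rw [hget a ha0, if_neg hab]; exact hra
  have epb : gp (PySem.List.pySetD P b a) b = a := by rw [hget b hb0, if_pos rfl]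
  intro x hx0 hxN g
  induction g generalizing x with
  | zero =>
    intro hs
    have hx : gp P x = x := hs
    by_cases hxb : x = b
    · have epx : gp (PySem.List.pySetD P b a) x = a := by rw [hget x hx0, if_pos hxb]
      have e1 : rootF 1 (PySem.List.pySetD P b a) x = a := by
        simp [rootF, epx, show a ≠ x from hxb ▸ hab]
      refine ⟨?_, by rw [e1]; simp [rootF, hxb]⟩
      show gp _ (rootF 1 _ x) = _
      rw [e1]; exact epa
    · have e : gp (PySem.List.pySetD P b a) x = x := by rw [hget x hx0, if_neg hxb]; exact hx
      have e1 : rootF 1 (PySem.List.pySetD P b a) x = x := rootF_fix _ _ x e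
      refine ⟨?_, by rw [e1]; simp [rootF, hxb]⟩
      show gp _ (rootF 1 _ x) = _
      rw [e1]; exact e
  | succ g ih =>
    intro hs
    by_cases hx : gp P x = x
    · by_cases hxb : x = b
      · have epx : gp (PySem.List.pySetD P b a) x = a := by rw [hget x hx0, if_pos hxb]
        have e1 : rootF (g + 1 + 1) (PySem.List.pySetD P b a) x = a := by
          have : rootF (g + 1 + 1) (PySem.List.pySetD P b a) x
              = rootF (g + 1) (PySem.List.pySetD P b a) a := by
            simp [rootF, epx, show a ≠ x from hxb ▸ hab]
          rw [this, rootF_fix _ _ a epa]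
        refine ⟨?_, ?_⟩
        · show gp _ (rootF (g + 1 + 1) _ x) = _
          rw [e1]; exact epa
        · rw [e1, rootF_fix _ P x hx, if_pos hxb]
      · have e : gp (PySem.List.pySetD P b a) x = x := by rw [hget x hx0, if_neg hxb]; exact hx
        have e1 : rootF (g + 1 + 1) (PySem.List.pySetD P b a) x = x := rootF_fix _ _ x e
        refine ⟨?_, ?_⟩
        · show gp _ (rootF (g + 1 + 1) _ x) = _
          rw [e1]; exact e
        · rw [e1, rootF_fix _ P x hx, if_neg hxb]
    · have hxb : x ≠ b := fun h => hx (h ▸ hrb)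
      have hy0 : 0 ≤ gp P x ∧ gp P x < N := hrng x hx0 hxN
      have hs' : Stab g P (gp P x) := by
        show gp P (rootF g P (gp P x)) = _
        have : rootF (g + 1) P x = rootF g P (gp P x) := by simp [rootF, hx]
        rw [← this]; exact hs
      have hrec := ih (gp P x) hy0.1 hy0.2 hs'
      have ex : gp (PySem.List.pySetD P b a) x = gp P x := by rw [hget x hx0, if_neg hxb]
      have e1 : rootF (g + 1 + 1) (PySem.List.pySetD P b a) x
          = rootF (g + 1) (PySem.List.pySetD P b a) (gp P x) := by
        simp [rootF, ex, hx]
      have e2 : rootF (g + 1) P x = rootF g P (gp P x) := by simp [rootF, hx]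
      refine ⟨?_, ?_⟩
      · show gp _ (rootF (g + 1 + 1) _ x) = _
        rw [e1]; exact hrec.1
      · rw [e1, e2, hrec.2]

def normI (N : Nat) (u : Int) : Int := if u < 0 then u + N else u

lemma normI_spec (N : Nat) (u : Int) (h1 : -(N : Int) ≤ u) (h2 : u < N) :
    0 ≤ normI N u ∧ normI N u < N := by
  unfold normI; split <;> omega

lemma normI_nonneg (N : Nat) (u : Int) (h : 0 ≤ u) : normI N u = u := by
  unfold normI; rw [if_neg (by omega)]

lemma gp_fold (xs : List Int) (i : Int) : PySem.List.pyGetD xs i 0 = gp xs i := rfl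

lemma find_spec (f : Nat) (p : List Int) (N : Nat) (u : Int)
    (hlen : p.length = N)
    (hrng : ∀ x : Int, 0 ≤ x → x < N → 0 ≤ gp p x ∧ gp p x < N)
    (hu1 : -(N : Int) ≤ u) (hu2 : u < N)
    (hf : u < 0 → 1 ≤ f)
    (hstab : Stab f p (normI N u)) :
    (pyFind f p u).1 = rootF f p (normI N u) ∧
    (pyFind f p u).2.length = N ∧
    (∀ x : Int, 0 ≤ x → x < N → 0 ≤ gp (pyFind f p u).2 x ∧ gp (pyFind f p u).2 x < N) ∧
    (∀ x : Int, 0 ≤ x → x < N → ∀ g : Nat, Stab g p x →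
      Stab g (pyFind f p u).2 x ∧ rootF g (pyFind f p u).2 x = rootF g p x) ∧
    (∀ x : Int, 0 ≤ x → x < N → (gp (pyFind f p u).2 x = x ↔ gp p x = x)) ∧
    (∀ comp : List Int, (∀ x : Int, 0 ≤ x → x < N → gp comp (gp p x) = gp comp x) →
      ∀ x : Int, 0 ≤ x → x < N → gp comp (gp (pyFind f p u).2 x) = gp comp x) := by
  induction f generalizing p u with
  | zero =>
    have hu0 : 0 ≤ u := by by_contra h; exact absurd (hf (by omega)) (by omega)
    have hν : normI N u = u := normI_nonneg N u hu0
    rw [hν] at hstab ⊢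
    refine ⟨rfl, hlen, hrng, fun x _ _ g hs => ⟨hs, rfl⟩, fun x _ _ => Iff.rfl, fun comp hl => hl⟩
  | succ f ih =>
    have hν := normI_spec N u hu1 hu2
    set ν := normI N u with hνdef
    have hgpu : gp p u = gp p ν := by
      by_cases h : u < 0
      · have := gp_wrap p u (by omega) h
        rw [this, hlen]
        congr 1
        simp [hνdef, normI, if_pos h]
      · rw [normI_nonneg N u (by omega)] at hνdef
        rw [hνdef]
    by_cases hroot : gp p ν = ν
    · have hrootF : rootF (f + 1) p ν = ν := rootF_fix _ p ν hroot
      by_cases hcase : u = ν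
      · -- u nonnegative, a root: else branch
        have : pyFind (f + 1) p u = (gp p u, p) := by
          simp only [pyFind, gp_fold]
          rw [if_neg (by rw [hgpu, hcase]; simp [hroot])]
        rw [this, hrootF]
        refine ⟨by simp [hcase, hroot], hlen, hrng,
          fun x _ _ g hs => ⟨hs, rfl⟩, fun x _ _ => Iff.rfl, fun comp hl => hl⟩
      · -- u negative, cell ν is a root: compression writes ν back into cell ν
        have hu0 : u < 0 := by
          by_contra h
          exact hcase (by rw [normI_nonneg N u (by omega)] at hνdef; rw [hνdef])
        have hne : gp p u ≠ u := by rw [hgpu, hroot]; omega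
        have hres : pyFind (f + 1) p u =
            (gp (PySem.List.pySetD (pyFind f p ν).2 u (pyFind f p ν).1) u,
             PySem.List.pySetD (pyFind f p ν).2 u (pyFind f p ν).1) := by
          simp only [pyFind, gp_fold]
          rw [if_pos hne]
          rw [hgpu, hroot]
        have hstabν : Stab f p ν := by
          show gp p (rootF f p ν) = rootF f p ν
          rw [rootF_fix f p ν hroot]; exact hroot
        have hih := ih p ν hlen hrng (by omega) (by exact_mod_cast hν.2)
          (by omega) (by rw [normI_nonneg N ν hν.1]; exact hstabν)
        rw [normI_nonneg N ν hν.1] at hih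
        obtain ⟨ihv, ihlen, ihrng, ihpres, ihroots, ihlink⟩ := hih
        rw [rootF_fix f p ν hroot] at ihv
        set res := pyFind f p ν
        have hset : PySem.List.pySetD res.2 u res.1 = PySem.List.pySetD res.2 ν res.1 := by
          rw [set_wrap res.2 u res.1 (by rw [ihlen]; omega) hu0, ihlen]
          congr 1
          simp [hνdef, normI, if_pos hu0]
        have hgres : gp res.2 ν = ν := (ihroots ν hν.1 hν.2).mpr hroot
        have hpw : ∀ y : Int, 0 ≤ y →
            gp (PySem.List.pySetD res.2 u res.1) y = gp res.2 y := by
          intro y hy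
          rw [hset, ihv, gp_set res.2 ν y ν hν.1 (by rw [ihlen]; exact_mod_cast hν.2) hy]
          split_ifs with h
          · rw [h, hgres]
          · rfl
        have hplen : (PySem.List.pySetD res.2 u res.1).length = N := by rw [len_set, ihlen]
        rw [hres]
        refine ⟨?_, hplen, ?_, ?_, ?_, ?_⟩
        · show gp (PySem.List.pySetD res.2 u res.1) u = _
          rw [gp_wrap _ u (by rw [hplen]; omega) hu0, hplen]
          have : u + (N : Int) = ν := by simp [hνdef, normI, if_pos hu0]
          rw [this, hpw ν hν.1, hgres, hrootF]
        · intro x hx0 hxN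
          rw [hpw x hx0]
          exact ihrng x hx0 hxN
        · intro x hx0 hxN g hs
          have h1 := ihpres x hx0 hxN g hs
          have h2 := rootF_ext g (PySem.List.pySetD res.2 u res.1) res.2 N
            (fun y hy => hpw y hy) (fun y hy0 hyN => by rw [hpw y hy0]; exact ihrng y hy0 hyN)
            x hx0 hxN
          have h3 := rootF_ext g res.2 (PySem.List.pySetD res.2 u res.1) N
            (fun y hy => (hpw y hy).symm) ihrng x hx0 hxN
          exact ⟨h3.2 h1.1, by rw [h2.1, h1.2]⟩
        · intro x hx0 hxN
          rw [hpw x hx0]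
          exact ihroots x hx0 hxN
        · intro comp hl x hx0 hxN
          rw [hpw x hx0]
          exact ihlink comp hl x hx0 hxN
    · -- cell ν is not a root: genuine recursion plus path compression
      set p0 := gp p ν with hp0def
      have hp0 : 0 ≤ p0 ∧ p0 < N := hrng ν hν.1 hν.2
      have hne : gp p u ≠ u := by
        rw [hgpu]
        by_cases h : u < 0
        · omega
        · rw [normI_nonneg N u (by omega)] at hνdef
          rw [← hνdef]; exact hroot
      have hres : pyFind (f + 1) p u =
          (gp (PySem.List.pySetD (pyFind f p p0).2 u (pyFind f p p0).1) u,
           PySem.List.pySetD (pyFind f p p0).2 u (pyFind f p p0).1) := by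
        simp only [pyFind, gp_fold]
        rw [if_pos hne]
        rw [hgpu]
      have hrootF : rootF (f + 1) p ν = rootF f p p0 := by
        simp [rootF, hroot, ← hp0def]
      have hstab0 : Stab f p p0 := by
        show gp p (rootF f p p0) = rootF f p p0
        rw [← hrootF]; exact hstab
      have hih := ih p p0 hlen hrng (by omega) (by exact_mod_cast hp0.2)
        (by omega) (by rw [normI_nonneg N p0 hp0.1]; exact hstab0)
      rw [normI_nonneg N p0 hp0.1] at hih
      obtain ⟨ihv, ihlen, ihrng, ihpres, ihroots, ihlink⟩ := hih
      set res := pyFind f p p0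
      set r := rootF f p p0 with hrdef
      have hr : 0 ≤ r ∧ r < N := rootF_range f p N hrng p0 hp0.1 hp0.2
      have hrroot : gp p r = r := hstab0
      have hset : PySem.List.pySetD res.2 u res.1 = PySem.List.pySetD res.2 ν res.1 := by
        by_cases h : u < 0
        · rw [set_wrap res.2 u res.1 (by rw [ihlen]; omega) h, ihlen]
          congr 1
          simp [hνdef, normI, if_pos h]
        · rw [normI_nonneg N u (by omega)] at hνdef
          rw [← hνdef]
      have hgresν : gp res.2 ν ≠ ν := fun h => hroot ((ihroots ν hν.1 hν.2).mp h)
      have hgresr : gp res.2 r = r := (ihroots r hr.1 hr.2).mpr hrroot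
      have hcomp := compress_spec res.2 N ν r ihlen ihrng hν.1 hν.2 hgresν hgresr
        ⟨f + 1, (ihpres ν hν.1 hν.2 (f + 1) hstab).1,
          by rw [(ihpres ν hν.1 hν.2 (f + 1) hstab).2, hrootF]⟩
      have hplen : (PySem.List.pySetD res.2 ν res.1).length = N := by rw [len_set, ihlen]
      have hgset : ∀ y : Int, 0 ≤ y →
          gp (PySem.List.pySetD res.2 ν res.1) y = if y = ν then r else gp res.2 y := by
        intro y hy
        rw [ihv, gp_set res.2 ν y r hν.1 (by rw [ihlen]; exact_mod_cast hν.2) hy]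
      have hrν : r ≠ ν := fun h => hgresν (h ▸ hgresr)
      rw [hres, hset]
      refine ⟨?_, hplen, ?_, ?_, ?_, ?_⟩
      · show gp (PySem.List.pySetD res.2 ν res.1) u = _
        have hgu : gp (PySem.List.pySetD res.2 ν res.1) u
            = gp (PySem.List.pySetD res.2 ν res.1) ν := by
          by_cases h : u < 0
          · rw [gp_wrap _ u (by rw [hplen]; omega) h, hplen]
            congr 1
            simp [hνdef, normI, if_pos h]
          · rw [normI_nonneg N u (by omega)] at hνdef
            rw [← hνdef]
        rw [hgu, hgset ν hν.1, if_pos rfl, hrootF]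
      · intro x hx0 hxN
        rw [hgset x hx0]
        split_ifs with h
        · exact hr
        · exact ihrng x hx0 hxN
      · intro x hx0 hxN g hs
        have h1 := ihpres x hx0 hxN g hs
        have h2 := hcomp x hx0 hxN g h1.1
        rw [← ihv] at h2
        exact ⟨h2.1, by rw [h2.2, h1.2]⟩
      · intro x hx0 hxN
        rw [hgset x hx0]
        split_ifs with h
        · subst h
          constructor
          · intro hc; exact absurd hc hrν
          · intro hc; exact absurd hc hroot
        · exact ihroots x hx0 hxN
      · intro comp hl x hx0 hxN
        rw [hgset x hx0]
        split_ifs with h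
        · subst h
          have := gp_comp_rootF (f + 1) p comp N hrng hl ν hν.1 hν.2
          rw [hrootF] at this
          exact this
        · exact ihlink comp hl x hx0 hxN

lemma gp_norm (xs : List Int) (N : Nat) (hlen : xs.length = N) (w : Int)
    (h1 : -(N : Int) ≤ w) (h2 : w < N) : gp xs w = gp xs (normI N w) := by
  by_cases h : w < 0
  · rw [gp_wrap xs w (by omega) h, hlen]
    congr 1
    simp [normI, if_pos h]
  · rw [normI_nonneg N w (by omega)]

def InvA (k : Nat) (parent comp : List Int) (N : Nat) : Prop :=
  parent.length = N ∧ comp.length = N ∧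
  (∀ x : Int, 0 ≤ x → x < N → 0 ≤ gp parent x ∧ gp parent x < N) ∧
  (∀ x : Int, 0 ≤ x → x < N → Stab (k + 1) parent x) ∧
  (∀ x : Int, 0 ≤ x → x < N → gp comp (gp parent x) = gp comp x) ∧
  (∀ x y : Int, 0 ≤ x → x < N → 0 ≤ y → y < N →
    gp parent x = x → gp parent y = y → gp comp x = gp comp y → x = y)

lemma root_char (k : Nat) (P comp : List Int) (N : Nat) (hInv : InvA k P comp N)
    (u v : Int) (hu0 : 0 ≤ u) (huN : u < N) (hv0 : 0 ≤ v) (hvN : v < N) :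
    (rootF (k + 1) P u = rootF (k + 1) P v ↔ gp comp u = gp comp v) := by
  obtain ⟨hlenP, hlenC, hrng, hstab, hlink, hinj⟩ := hInv
  constructor
  · intro h
    rw [← gp_comp_rootF (k + 1) P comp N hrng hlink u hu0 huN,
        ← gp_comp_rootF (k + 1) P comp N hrng hlink v hv0 hvN, h]
  · intro h
    have hr1 := rootF_range (k + 1) P N hrng u hu0 huN
    have hr2 := rootF_range (k + 1) P N hrng v hv0 hvN
    refine hinj _ _ hr1.1 hr1.2 hr2.1 hr2.2 (hstab u hu0 huN) (hstab v hv0 hvN) ?_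
    rw [gp_comp_rootF (k + 1) P comp N hrng hlink u hu0 huN,
        gp_comp_rootF (k + 1) P comp N hrng hlink v hv0 hvN, h]

lemma union_update_spec (k : Nat) (P comp : List Int) (N : Nat) (a b cu cv : Int)
    (hInv : InvA k P comp N)
    (ha0 : 0 ≤ a) (haN : a < N) (hb0 : 0 ≤ b) (hbN : b < N)
    (hra : gp P a = a) (hrb : gp P b = b) (hab : a ≠ b)
    (hlab : (gp comp a = cu ∧ gp comp b = cv) ∨ (gp comp a = cv ∧ gp comp b = cu))
    (hcc : cu ≠ cv) :
    InvA (k + 1) (PySem.List.pySetD P b a) (comp.map (fun c => if c = cv then cu else c)) N := by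
  obtain ⟨hlenP, hlenC, hrng, hstab, hlink, hinj⟩ := hInv
  have hget : ∀ y : Int, 0 ≤ y →
      gp (PySem.List.pySetD P b a) y = if y = b then a else gp P y :=
    fun y hy => gp_set P b y a hb0 (by omega) hy
  have hmap : ∀ z : Int, 0 ≤ z → z < N →
      gp (comp.map (fun c => if c = cv then cu else c)) z
        = (fun c => if c = cv then cu else c) (gp comp z) :=
    fun z hz0 hzN => gp_map comp _ z hz0 (by omega)
  have hlk := link_spec P N a b hlenP hrng ha0 haN hb0 hbN hra hrb hab
  refine ⟨by rw [len_set]; exact hlenP, by rw [List.length_map]; exact hlenC, ?_, ?_, ?_, ?_⟩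
  · intro x hx0 hxN
    rw [hget x hx0]
    split_ifs with h
    · exact ⟨ha0, haN⟩
    · exact hrng x hx0 hxN
  · intro x hx0 hxN
    exact (hlk x hx0 hxN (k + 1) (hstab x hx0 hxN)).1
  · intro x hx0 hxN
    have hin : 0 ≤ gp (PySem.List.pySetD P b a) x ∧ gp (PySem.List.pySetD P b a) x < N := by
      rw [hget x hx0]; split_ifs with h
      · exact ⟨ha0, haN⟩
      · exact hrng x hx0 hxN
    rw [hmap x hx0 hxN, hmap _ hin.1 hin.2, hget x hx0]
    split_ifs with h
    · -- x = b : the new link b → a; both labels relabel to the same value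
      subst h
      rcases hlab with ⟨hca, hcb⟩ | ⟨hca, hcb⟩
      · rw [hca, hcb]; simp [hcc]
      · rw [hca, hcb]; simp [hcc]
    · rw [hlink x hx0 hxN]
  · intro x y hx0 hxN hy0 hyN hrx hry hxy
    rw [hget x hx0] at hrx
    rw [hget y hy0] at hry
    have hxb : x ≠ b := by
      intro h; rw [if_pos h] at hrx; exact hab (hrx.trans h)
    have hyb : y ≠ b := by
      intro h; rw [if_pos h] at hry; exact hab (hry.trans h)
    rw [if_neg hxb] at hrx
    rw [if_neg hyb] at hry
    rw [hmap x hx0 hxN, hmap y hy0 hyN] at hxy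
    simp only at hxy
    rcases hlab with ⟨hca, hcb⟩ | ⟨hca, hcb⟩
    · -- label cv belongs to root b, which x and y are not
      have hxcv : gp comp x ≠ cv := fun h =>
        hxb (hinj x b hx0 hxN hb0 hbN hrx hrb (h.trans hcb.symm))
      have hycv : gp comp y ≠ cv := fun h =>
        hyb (hinj y b hy0 hyN hb0 hbN hry hrb (h.trans hcb.symm))
      rw [if_neg hxcv, if_neg hycv] at hxy
      exact hinj x y hx0 hxN hy0 hyN hrx hry hxy
    · -- label cv belongs to root a; label cu belongs to root b
      by_cases hxcv : gp comp x = cv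
      · have hxa : x = a := hinj x a hx0 hxN ha0 haN hrx hra (hxcv.trans hca.symm)
        by_cases hycv : gp comp y = cv
        · have hya : y = a := hinj y a hy0 hyN ha0 haN hry hra (hycv.trans hca.symm)
          rw [hxa, hya]
        · rw [if_pos hxcv, if_neg hycv] at hxy
          exact absurd (hinj y b hy0 hyN hb0 hbN hry hrb (hxy.symm.trans hcb.symm)) hyb
      · by_cases hycv : gp comp y = cv
        · rw [if_neg hxcv, if_pos hycv] at hxy
          exact absurd (hinj x b hx0 hxN hb0 hbN hrx hrb (hxy.trans hcb.symm)) hxb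
        · rw [if_neg hxcv, if_neg hycv] at hxy
          exact hinj x y hx0 hxN hy0 hyN hrx hry hxy

lemma find_invA (k : Nat) (P comp : List Int) (N : Nat) (w : Int)
    (hInv : InvA k P comp N) (hkN : k ≤ N) (h1 : -(N : Int) ≤ w) (h2 : w < N) :
    (pyFind (N + 2) P w).1 = rootF (k + 1) P (normI N w) ∧
    InvA k (pyFind (N + 2) P w).2 comp N ∧
    (∀ x : Int, 0 ≤ x → x < N → rootF (k + 1) (pyFind (N + 2) P w).2 x = rootF (k + 1) P x) := by
  obtain ⟨hlenP, hlenC, hrng, hstab, hlink, hinj⟩ := hInv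
  have hν := normI_spec N w h1 h2
  have hstabw := hstab _ hν.1 hν.2
  have hmono := stab_mono (k + 1) (N + 2) P (normI N w) (by omega) hstabw
  obtain ⟨v1, l1, r1, pre1, rt1, lk1⟩ :=
    find_spec (N + 2) P N w hlenP hrng h1 h2 (fun _ => by omega) hmono.2
  refine ⟨by rw [v1, hmono.1], ⟨l1, hlenC, r1,
    fun x hx0 hxN => (pre1 x hx0 hxN (k + 1) (hstab x hx0 hxN)).1,
    lk1 comp hlink, ?_⟩,
    fun x hx0 hxN => (pre1 x hx0 hxN (k + 1) (hstab x hx0 hxN)).2⟩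
  intro x y hx0 hxN hy0 hyN hrx hry hxy
  exact hinj x y hx0 hxN hy0 hyN ((rt1 x hx0 hxN).mp hrx) ((rt1 y hy0 hyN).mp hry) hxy

lemma loop_eq (st : List (Int × Int × Int)) : ∀ (k : Nat) (parent rank comp : List Int) (N : Nat),
    InvA k parent comp N →
    k + st.length ≤ N →
    (∀ e ∈ st, -(N : Int) ≤ e.1 ∧ e.1 < N ∧ -(N : Int) ≤ e.2.1 ∧ e.2.1 < N) →
    loopA st parent rank = loopB st comp := by
  induction st with
  | nil => intro k parent rank comp N _ _ _; rfl
  | cons e rest ih =>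
    intro k parent rank comp N hInv hk hb
    obtain ⟨u, v, w⟩ := e
    obtain ⟨hu1, hu2, hv1, hv2⟩ := hb _ (List.mem_cons_self)
    have hbrest := fun e he => hb e (List.mem_cons_of_mem _ he)
    have hνu := normI_spec N u hu1 hu2
    have hνv := normI_spec N v hv1 hv2
    have hlenP := hInv.1
    have hlenC := hInv.2.1
    have hkN : k ≤ N := by simp only [List.length_cons] at hk; omega
    -- first find
    have F1 := find_invA k parent comp N u hInv hkN hu1 hu2
    set A1 := pyFind (N + 2) parent u with hA1
    have hlen1 : A1.2.length = N := F1.2.1.1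
    -- second find
    have F2 := find_invA k A1.2 comp N v F1.2.1 hkN hv1 hv2
    set A2 := pyFind (N + 2) A1.2 v with hA2
    have hlen2 : A2.2.length = N := F2.2.1.1
    set ru := rootF (k + 1) parent (normI N u) with hru
    set rv := rootF (k + 1) parent (normI N v) with hrv
    have hv1' : A1.1 = ru := F1.1
    have hv2' : A2.1 = rv := by rw [F2.1, F1.2.2 _ hνv.1 hνv.2]
    set cu := gp comp u with hcu
    set cv := gp comp v with hcv
    have hcuν : gp comp (normI N u) = cu := (gp_norm comp N hlenC u hu1 hu2).symm
    have hcvν : gp comp (normI N v) = cv := (gp_norm comp N hlenC v hv1 hv2).symm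
    have hiff : (ru = rv) ↔ (cu = cv) := by
      rw [← hcuν, ← hcvν]
      exact root_char k parent comp N hInv _ _ hνu.1 hνu.2 hνv.1 hνv.2
    show loopA ((u, v, w) :: rest) parent rank = loopB ((u, v, w) :: rest) comp
    simp only [loopA, loopB, gp_fold]
    rw [hlenP, ← hA1, hlen1, ← hA2, hv1', hv2', ← hcu, ← hcv]
    by_cases hcc : cu = cv
    · rw [if_pos (hiff.mpr hcc), if_pos hcc]
    · rw [if_neg (fun h => hcc (hiff.mp h)), if_neg hcc]
      -- the union call
      simp only [pyUnion]
      rw [hlen2]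
      have F3 := find_invA k A2.2 comp N u F2.2.1 hkN hu1 hu2
      set A3 := pyFind (N + 2) A2.2 u with hA3
      have hlen3 : A3.2.length = N := F3.2.1.1
      have F4 := find_invA k A3.2 comp N v F3.2.1 hkN hv1 hv2
      set A4 := pyFind (N + 2) A3.2 v with hA4
      have hv3' : A3.1 = ru := by
        rw [F3.1, F2.2.2 _ hνu.1 hνu.2, F1.2.2 _ hνu.1 hνu.2]
      have hv4' : A4.1 = rv := by
        rw [F4.1, F3.2.2 _ hνv.1 hνv.2, F2.2.2 _ hνv.1 hνv.2, F1.2.2 _ hνv.1 hνv.2]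
      rw [hlen3, ← hA4, hv3', hv4']
      have hrune : ru ≠ rv := fun h => hcc (hiff.mp h)
      rw [if_pos hrune]
      -- facts about the final parent array A4.2
      have hInv4 : InvA k A4.2 comp N := F4.2.1
      have hrt4u : rootF (k + 1) A4.2 (normI N u) = ru := by
        rw [F4.2.2 _ hνu.1 hνu.2, F3.2.2 _ hνu.1 hνu.2, F2.2.2 _ hνu.1 hνu.2,
          F1.2.2 _ hνu.1 hνu.2]
      have hrt4v : rootF (k + 1) A4.2 (normI N v) = rv := by
        rw [F4.2.2 _ hνv.1 hνv.2, F3.2.2 _ hνv.1 hνv.2, F2.2.2 _ hνv.1 hνv.2,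
          F1.2.2 _ hνv.1 hνv.2]
      have hrur : 0 ≤ ru ∧ ru < N := by
        rw [← hrt4u]; exact rootF_range _ _ N hInv4.2.2.1 _ hνu.1 hνu.2
      have hrvr : 0 ≤ rv ∧ rv < N := by
        rw [← hrt4v]; exact rootF_range _ _ N hInv4.2.2.1 _ hνv.1 hνv.2
      have hroot_u : gp A4.2 ru = ru := by
        rw [← hrt4u]; exact hInv4.2.2.2.1 _ hνu.1 hνu.2
      have hroot_v : gp A4.2 rv = rv := by
        rw [← hrt4v]; exact hInv4.2.2.2.1 _ hνv.1 hνv.2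
      have hlab_u : gp comp ru = cu := by
        rw [← hrt4u, gp_comp_rootF (k + 1) A4.2 comp N hInv4.2.2.1 hInv4.2.2.2.2.1 _ hνu.1 hνu.2,
          hcuν]
      have hlab_v : gp comp rv = cv := by
        rw [← hrt4v, gp_comp_rootF (k + 1) A4.2 comp N hInv4.2.2.1 hInv4.2.2.2.2.1 _ hνv.1 hνv.2,
          hcvν]
      have hk' : (k + 1) + rest.length ≤ N := by
        simp only [List.length_cons] at hk; omega
      -- the three rank branches
      by_cases hgt : PySem.List.pyGetD rank ru 0 > PySem.List.pyGetD rank rv 0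
      · rw [if_pos hgt]
        exact ih (k + 1) _ rank _ N
          (union_update_spec k A4.2 comp N ru rv cu cv hInv4 hrur.1 hrur.2 hrvr.1 hrvr.2
            hroot_u hroot_v hrune (Or.inl ⟨hlab_u, hlab_v⟩) hcc) hk' hbrest
      · rw [if_neg hgt]
        by_cases hlt : PySem.List.pyGetD rank ru 0 < PySem.List.pyGetD rank rv 0
        · rw [if_pos hlt]
          exact ih (k + 1) _ rank _ N
            (union_update_spec k A4.2 comp N rv ru cu cv hInv4 hrvr.1 hrvr.2 hrur.1 hrur.2
              hroot_v hroot_u (Ne.symm hrune) (Or.inr ⟨hlab_v, hlab_u⟩) hcc) hk' hbrest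
        · rw [if_neg hlt]
          exact ih (k + 1) _ _ _ N
            (union_update_spec k A4.2 comp N ru rv cu cv hInv4 hrur.1 hrur.2 hrvr.1 hrvr.2
              hroot_u hroot_v hrune (Or.inl ⟨hlab_u, hlab_v⟩) hcc) hk' hbrest

lemma gp_pyRange (n x : Int) (h0 : 0 ≤ x) (hx : x < n) :
    gp (PySem.List.pyRange 0 n 1) x = x := by
  rw [gp_nonneg_eq_getD _ _ h0, PySem.List.pyRange_one]
  rw [List.getD_eq_getElem?_getD, List.getElem?_map]
  rw [List.getElem?_eq_getElem (by simp [List.length_range]; omega : x.toNat < (List.range (n - 0).toNat).length)]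
  simp
  omega

-- ===== VERDICT (by name: the statement is the Claim_ definition above) =====
theorem is_valid_spanning_tree_spec : Claim_equal_is_valid_spanning_tree := by
  intro graph st n _hDom hPre
  show is_valid_spanning_tree graph st n = is_valid_spanning_tree_alt graph st n
  unfold is_valid_spanning_tree is_valid_spanning_tree_alt
  by_cases hg : (st.length : Int) ≠ n - 1
  · rw [if_pos hg, if_pos hg]
  · rw [if_neg hg, if_neg hg]
    rw [not_not] at hg
    have hn1 : 1 ≤ n := by omega
    set N := n.toNat with hN
    have hNn : (N : Int) = n := by omega
    have hbounds : ∀ e ∈ st, -(N : Int) ≤ e.1 ∧ e.1 < N ∧ -(N : Int) ≤ e.2.1 ∧ e.2.1 < N := by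
      intro e he
      obtain ⟨a1, a2, a3, a4⟩ := hPre hg e he
      exact ⟨by omega, by omega, by omega, by omega⟩
    have hlen : (PySem.List.pyRange 0 n 1).length = N := by
      rw [PySem.List.length_pyRange_one]; omega
    have hgpr : ∀ x : Int, 0 ≤ x → x < N → gp (PySem.List.pyRange 0 n 1) x = x :=
      fun x h0 hx => gp_pyRange n x h0 (by omega)
    have hInv0 : InvA 0 (PySem.List.pyRange 0 n 1) (PySem.List.pyRange 0 n 1) N := by
      refine ⟨hlen, hlen, ?_, ?_, ?_, ?_⟩
      · intro x hx0 hxN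
        rw [hgpr x hx0 hxN]; exact ⟨hx0, hxN⟩
      · intro x hx0 hxN
        show gp _ (rootF 1 _ x) = rootF 1 _ x
        rw [rootF_fix 1 _ x (hgpr x hx0 hxN), hgpr x hx0 hxN]
      · intro x hx0 hxN
        rw [hgpr x hx0 hxN]
        exact hgpr x hx0 hxN
      · intro x y hx0 hxN hy0 hyN _ _ hxy
        rw [hgpr x hx0 hxN, hgpr y hy0 hyN] at hxy
        exact hxy
    have hkk : 0 + st.length ≤ N := by omega
    exact loop_eq st 0 _ _ _ N hInv0 hkk hbounds
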